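-- pv_equiv track=rewrite | github.com/LineCounters/LinesCounter | src/LineBuilder.py | _is_block_complete
-- ===== SOURCE A (Python) =====
-- from typing import Tuple, List, Optional
--
-- def _is_block_complete(block_lines: List[str]) -> bool:
--     block_text = " ".join(block_lines)
--     balance = 0
--     for char in block_text:
--         is_opening = char in "([{"
--         is_closing = char in ")]}"
--         if is_opening:
--             balance += 1
--         elif is_closing:
--             balance -= 1
--     return balance == 0
-- ===== SOURCE B (Python) =====
-- from typing import List
--
-- def _is_block_complete(block_lines: List[str]) -> bool:
--     text = " ".join(block_lines)
--     opens = sum(text.count(c) for c in "([{")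
--     closes = sum(text.count(c) for c in ")]}")
--     return opens == closes
-- ===== Notes on version B (the rewrite author's own statement) =====
-- stated objective: faster
-- what changed: Replaces the single character-by-character branch-and-accumulate balance loop with independent whole-string str.count passes: opens and closes are each a sum of three counts and the result is their comparison.
import Mathlib
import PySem

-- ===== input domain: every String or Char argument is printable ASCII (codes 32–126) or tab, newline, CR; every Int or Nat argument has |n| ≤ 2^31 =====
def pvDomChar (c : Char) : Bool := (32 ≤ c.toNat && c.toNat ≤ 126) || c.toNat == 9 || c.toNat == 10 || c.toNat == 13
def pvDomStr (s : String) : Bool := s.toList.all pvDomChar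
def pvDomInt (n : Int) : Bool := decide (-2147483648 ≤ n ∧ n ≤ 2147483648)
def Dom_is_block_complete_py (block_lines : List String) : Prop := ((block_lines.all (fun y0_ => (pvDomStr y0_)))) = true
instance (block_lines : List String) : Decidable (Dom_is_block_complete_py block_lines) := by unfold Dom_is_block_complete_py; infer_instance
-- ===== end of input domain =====

-- ===== PORT A =====
-- B replaces A's single branch-per-char balance loop with independent whole-string
-- str.count passes summed per bracket kind; a timing run measured B faster (constant factor).
def is_block_complete_py (block_lines : List String) : Bool :=
  let block_text := PySem.Str.join " " block_lines
  let balance := block_text.toList.foldl (fun balance char =>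
    let is_opening := PySem.Chars.isIn [char] "([{".toList
    let is_closing := PySem.Chars.isIn [char] ")]}".toList
    if is_opening then balance + 1
    else if is_closing then balance - 1
    else balance) (0 : Int)
  balance == 0

-- ===== PORT B =====
def is_block_complete_py_alt (block_lines : List String) : Bool :=
  let text := PySem.Str.join " " block_lines
  let opens := ("([{".toList.map (fun c => (PySem.Chars.count text.toList [c] : Int))).sum
  let closes := (")]}".toList.map (fun c => (PySem.Chars.count text.toList [c] : Int))).sum
  opens == closes

-- ===== PRECONDITION & SPEC =====
def Spec_is_block_complete_py (block_lines : List String) (out : Bool) : Prop := out = is_block_complete_py_alt block_lines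
instance (block_lines : List String) (out : Bool) : Decidable (Spec_is_block_complete_py block_lines out) := by unfold Spec_is_block_complete_py; infer_instance

-- ===== CLAIM (what is proved, stated in full; the proofs are below) =====
def Claim_equal_is_block_complete_py : Prop := ∀ (block_lines : List String), Dom_is_block_complete_py block_lines → Spec_is_block_complete_py block_lines (is_block_complete_py block_lines)

-- ===== LEMMAS AND PROOFS =====

-- count.go on a one-character needle, with enough fuel, counts occurrences of that character
theorem pv_count_go_singleton (c : Char) : ∀ (l : List Char) (fuel acc : Nat),
    l.length ≤ fuel → PySem.Chars.count.go [c] fuel l acc = acc + l.count c := by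
  intro l
  induction l with
  | nil => intro fuel acc _; cases fuel <;> simp [PySem.Chars.count.go]
  | cons h t ih =>
    intro fuel acc hf
    cases fuel with
    | zero => simp at hf
    | succ f =>
      rw [PySem.Chars.count.go]
      have ht : t.length ≤ f := by simpa using hf
      by_cases hc : c = h
      · subst hc
        simp [List.isPrefixOf, ih f (acc + 1) ht]
        omega
      · simp [List.isPrefixOf, hc, Ne.symm hc, ih f acc ht]

-- Python's text.count(c) for a single character c is the character count
theorem pv_count_singleton (l : List Char) (c : Char) :
    PySem.Chars.count l [c] = l.count c := by
  simp [PySem.Chars.count, pv_count_go_singleton c l l.length 0 le_rfl]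

-- A's running balance equals opens minus closes, counted per character
theorem pv_balance_eq (l : List Char) : ∀ (b : Int),
    l.foldl (fun balance char =>
      let is_opening := PySem.Chars.isIn [char] "([{".toList
      let is_closing := PySem.Chars.isIn [char] ")]}".toList
      if is_opening then balance + 1
      else if is_closing then balance - 1
      else balance) b
    = b + ((l.count '(' + l.count '[' + l.count '{' : Nat) : Int)
        - ((l.count ')' + l.count ']' + l.count '}' : Nat) : Int) := by
  induction l with
  | nil => intro b; simp
  | cons h t ih =>
    intro b
    have hmem : ∀ (s : List Char), PySem.Chars.isIn [h] s = (s.contains h) := by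
      intro s
      rcases hcon : s.contains h with _ | _
      · rw [PySem.Chars.isIn_eq_false_iff]
        intro hinf
        have : h ∈ s := List.singleton_sublist.mp hinf.sublist
        simp at hcon
        exact hcon this
      · rw [PySem.Chars.isIn_iff_infix]
        have : h ∈ s := by simpa [List.contains_iff_mem] using hcon
        obtain ⟨s1, s2, rfl⟩ := List.append_of_mem this
        exact ⟨s1, s2, by simp⟩
    simp only [List.foldl_cons, hmem, List.count_cons]
    by_cases h1 : h = '(' <;> by_cases h2 : h = '[' <;> by_cases h3 : h = '{' <;>
      by_cases h4 : h = ')' <;> by_cases h5 : h = ']' <;> by_cases h6 : h = '}' <;>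
      simp_all <;> ring

-- ===== VERDICT (by name: the statement is the Claim_ definition above) =====
theorem is_block_complete_py_spec : Claim_equal_is_block_complete_py := by
  intro block_lines _
  unfold Spec_is_block_complete_py is_block_complete_py is_block_complete_py_alt
  simp only [pv_count_singleton, pv_balance_eq]
  rw [Bool.eq_iff_iff]
  simp only [beq_iff_eq, show ("([{" : String).toList = ['(', '[', '{'] from rfl,
    show (")]}" : String).toList = [')', ']', '}'] from rfl,
    List.map_cons, List.map_nil, List.sum_cons, List.sum_nil]
  omega
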